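-- pv_equiv track=rewrite | github.com/iGEM-Uprize-I/Biosafety-Alternative-Recommendation-Tool-BART | Step3.py | map_core_pocket_to_target
-- ===== SOURCE A (Python) =====
-- from typing import Dict, List, Tuple, Optional
--
-- def build_pos_maps(aln_seq: str) -> Tuple[Dict[int,int], Dict[int,int]]:
--     """Build mapping between ungapped sequence positions (1-based) and alignment indices (0-based)."""
--     map_seq2aln: Dict[int,int] = {}
--     map_aln2seq: Dict[int,int] = {}
--     seq_pos = 0
--     for aln_i, ch in enumerate(aln_seq):
--         if ch != "-":
--             seq_pos += 1
--             map_seq2aln[seq_pos] = aln_i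
--             map_aln2seq[aln_i] = seq_pos
--         else:
--             map_aln2seq[aln_i] = 0
--     return map_seq2aln, map_aln2seq
--
-- def map_core_pocket_to_target(core_aln: str, tgt_aln: str, core_pocket_1b: List[int]) -> List[int]:
--     """Map core pocket positions (1-based on ungapped core) to target ungapped positions via alignment columns."""
--     core_s2a, _ = build_pos_maps(core_aln)
--     _, tgt_a2s   = build_pos_maps(tgt_aln)
--     out = []
--     for p in core_pocket_1b:
--         aln_idx = core_s2a.get(p)
--         if aln_idx is None:
--             continue
--         tgt_pos = tgt_a2s.get(aln_idx, 0)
--         if tgt_pos > 0: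
--             out.append(tgt_pos)
--     return sorted(set(out))
-- ===== SOURCE B (Python) =====
-- def map_core_pocket_to_target(core_aln, tgt_aln, core_pocket_1b):
--     """Single pass over the zipped alignments: build a direct core-position ->
--     target-position map, then filter the pocket through it."""
--     direct = {}
--     core_pos = 0
--     tgt_pos = 0
--     for c, t in zip(core_aln, tgt_aln):
--         if t != "-":
--             tgt_pos += 1
--         if c != "-":
--             core_pos += 1
--             if t != "-":
--                 direct[core_pos] = tgt_pos
--     return sorted({direct[p] for p in core_pocket_1b if p in direct})
-- ===== Notes on version B (the rewrite author's own statement) =====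
-- stated objective: simpler
-- what changed: Replaces the two separately built position dictionaries (core seq->aln and target aln->seq) joined per pocket position by a single simultaneous zip pass over both alignments that builds one direct core-position -> target-position map, then a single filtered lookup of the pocket list.
import Mathlib
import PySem

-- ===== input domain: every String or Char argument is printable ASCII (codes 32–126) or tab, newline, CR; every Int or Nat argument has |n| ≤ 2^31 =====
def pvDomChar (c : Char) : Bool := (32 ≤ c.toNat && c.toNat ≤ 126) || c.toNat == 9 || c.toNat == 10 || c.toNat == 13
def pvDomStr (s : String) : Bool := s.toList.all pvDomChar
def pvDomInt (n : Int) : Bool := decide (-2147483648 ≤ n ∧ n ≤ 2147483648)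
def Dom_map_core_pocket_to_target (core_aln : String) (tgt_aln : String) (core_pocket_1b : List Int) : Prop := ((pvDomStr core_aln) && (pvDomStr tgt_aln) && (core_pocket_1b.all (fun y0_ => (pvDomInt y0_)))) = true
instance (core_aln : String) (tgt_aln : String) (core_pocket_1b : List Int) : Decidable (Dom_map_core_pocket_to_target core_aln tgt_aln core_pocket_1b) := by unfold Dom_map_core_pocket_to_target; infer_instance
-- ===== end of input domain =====

-- B replaces A's two per-sequence position dicts (joined through alignment indices) by one
-- simultaneous pass over the zipped alignments building a direct core-pos → target-pos map
-- (objective: simpler decomposition, same asymptotic cost).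

-- ===== PORT A =====
-- build_pos_maps: loop over enumerate(aln_seq) carrying (aln_i, seq_pos, map_seq2aln, map_aln2seq)
def pvBpm : List Char → Int → Int → PySem.Dict Int Int → PySem.Dict Int Int →
    PySem.Dict Int Int × PySem.Dict Int Int
  | [], _, _, s2a, a2s => (s2a, a2s)
  | ch :: rest, i, sp, s2a, a2s =>
    if ch ≠ '-' then
      pvBpm rest (i + 1) (sp + 1) (s2a.insert (sp + 1) i) (a2s.insert i (sp + 1))
    else
      pvBpm rest (i + 1) sp s2a (a2s.insert i 0)

def build_pos_maps (aln_seq : String) : PySem.Dict Int Int × PySem.Dict Int Int :=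
  pvBpm aln_seq.toList 0 0 PySem.Dict.empty PySem.Dict.empty

def map_core_pocket_to_target (core_aln : String) (tgt_aln : String) (core_pocket_1b : List Int) : List Int :=
  PySem.List.sorted
    (PySem.Set.ofList (core_pocket_1b.foldl (fun acc p =>
      match (build_pos_maps core_aln).1.get? p with
      | none => acc
      | some aln_idx =>
        if 0 < (build_pos_maps tgt_aln).2.getD aln_idx 0 then
          acc ++ [(build_pos_maps tgt_aln).2.getD aln_idx 0]
        else acc) []))
    (fun x => x) false

-- ===== PORT B =====
-- loop over zip(core_aln, tgt_aln) carrying (core_pos, tgt_pos, direct)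
def pvDirect : List (Char × Char) → Int → Int → PySem.Dict Int Int → PySem.Dict Int Int
  | [], _, _, d => d
  | (c, t) :: rest, cp, tp, d =>
    let tp' := if t ≠ '-' then tp + 1 else tp
    if c ≠ '-' then
      pvDirect rest (cp + 1) tp' (if t ≠ '-' then d.insert (cp + 1) tp' else d)
    else
      pvDirect rest cp tp' d

def map_core_pocket_to_target_alt (core_aln : String) (tgt_aln : String) (core_pocket_1b : List Int) : List Int :=
  PySem.List.sorted
    (PySem.Set.ofList (core_pocket_1b.filterMap (fun p =>
      (pvDirect (core_aln.toList.zip tgt_aln.toList) 0 0 PySem.Dict.empty).get? p)))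
    (fun x => x) false

-- ===== PRECONDITION & SPEC =====
def Spec_map_core_pocket_to_target (core_aln : String) (tgt_aln : String) (core_pocket_1b : List Int) (out : List Int) : Prop := out = map_core_pocket_to_target_alt core_aln tgt_aln core_pocket_1b
instance (core_aln : String) (tgt_aln : String) (core_pocket_1b : List Int) (out : List Int) : Decidable (Spec_map_core_pocket_to_target core_aln tgt_aln core_pocket_1b out) := by unfold Spec_map_core_pocket_to_target; infer_instance

-- ===== CLAIM (what is proved, stated in full; the proofs are below) =====
def Claim_equal_map_core_pocket_to_target : Prop := ∀ (core_aln : String) (tgt_aln : String) (core_pocket_1b : List Int), Dom_map_core_pocket_to_target core_aln tgt_aln core_pocket_1b → Spec_map_core_pocket_to_target core_aln tgt_aln core_pocket_1b (map_core_pocket_to_target core_aln tgt_aln core_pocket_1b)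

-- ===== LEMMAS AND PROOFS =====

-- A's per-pocket-position composite lookup: core seq-pos → alignment column → target seq-pos (> 0)
def pvF (s2a a2s : PySem.Dict Int Int) (p : Int) : Option Int :=
  (s2a.get? p).bind (fun j => if 0 < a2s.getD j 0 then some (a2s.getD j 0) else none)

theorem pvF_none {s2a a2s : PySem.Dict Int Int} {p : Int} (hs : s2a.get? p = none) :
    pvF s2a a2s p = none := by simp [pvF, hs]

theorem pvF_some {s2a a2s : PySem.Dict Int Int} {p j : Int} (hs : s2a.get? p = some j) :
    pvF s2a a2s p = if 0 < a2s.getD j 0 then some (a2s.getD j 0) else none := by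
  simp [pvF, hs]

theorem pvF_eq_of_get?_eq {s2a s2a' a2s : PySem.Dict Int Int} {p : Int}
    (h : s2a'.get? p = s2a.get? p) : pvF s2a' a2s p = pvF s2a a2s p := by
  simp [pvF, h]

theorem pvF_s2a_insert_ne {s2a a2s : PySem.Dict Int Int} {k : Int} (v : Int) {p : Int}
    (hne : p ≠ k) : pvF (s2a.insert k v) a2s p = pvF s2a a2s p :=
  pvF_eq_of_get?_eq (PySem.Dict.get?_insert_of_ne _ _ hne)

-- inserting a column ≥ every value stored in s2a does not change the composite lookup
theorem pvF_insert_high {s2a a2s : PySem.Dict Int Int} {i : Int}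
    (h4 : ∀ p j, s2a.get? p = some j → j < i) (v : Int) (p : Int) :
    pvF s2a (a2s.insert i v) p = pvF s2a a2s p := by
  cases hs : s2a.get? p with
  | none => rw [pvF_none hs, pvF_none hs]
  | some j =>
    rw [pvF_some hs, pvF_some hs,
      PySem.Dict.getD_insert_of_ne _ _ _ (by have := h4 p j hs; omega)]

-- keys ≤ sp are untouched by pvBpm's seq2aln side
theorem pvBpm_s2a_low : ∀ (s : List Char) (i sp : Int) (s2a a2s : PySem.Dict Int Int)
    (p : Int), p ≤ sp → ((pvBpm s i sp s2a a2s).1).get? p = s2a.get? p := by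
  intro s
  induction s with
  | nil => intro i sp s2a a2s p _; rfl
  | cons c rest ih =>
    intro i sp s2a a2s p hp
    by_cases hc : c ≠ '-'
    · simp only [pvBpm, if_pos hc]
      rw [ih _ _ _ _ _ (by omega)]
      exact PySem.Dict.get?_insert_of_ne _ _ (by omega)
    · simp only [pvBpm, if_neg hc]
      exact ih _ _ _ _ _ hp

-- fresh keys > sp inserted by pvBpm's seq2aln side carry values ≥ i
theorem pvBpm_s2a_high : ∀ (s : List Char) (i sp : Int) (s2a a2s : PySem.Dict Int Int)
    (p j : Int), sp < p → (∀ q, sp < q → s2a.get? q = none) →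
    ((pvBpm s i sp s2a a2s).1).get? p = some j → i ≤ j := by
  intro s
  induction s with
  | nil =>
    intro i sp s2a a2s p j hp hfresh h
    simp only [pvBpm] at h
    rw [hfresh p hp] at h
    exact absurd h (by simp)
  | cons c rest ih =>
    intro i sp s2a a2s p j hp hfresh h
    by_cases hc : c ≠ '-'
    · simp only [pvBpm, if_pos hc] at h
      by_cases hpe : p = sp + 1
      · rw [pvBpm_s2a_low _ _ _ _ _ _ (by omega)] at h
        subst hpe
        rw [PySem.Dict.get?_insert_self] at h
        injection h with hinj
        omega
      · have := ih (i + 1) (sp + 1) _ _ p j (by omega)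
          (fun q hq => by
            rw [PySem.Dict.get?_insert_of_ne _ _ (by omega)]
            exact hfresh q (by omega)) h
        omega
    · simp only [pvBpm, if_neg hc] at h
      have := ih (i + 1) sp _ _ p j hp hfresh h
      omega

-- alignment columns < i are untouched by pvBpm's aln2seq side
theorem pvBpm_a2s_low : ∀ (s : List Char) (i sp : Int) (s2a a2s : PySem.Dict Int Int)
    (j : Int), j < i → ((pvBpm s i sp s2a a2s).2).get? j = a2s.get? j := by
  intro s
  induction s with
  | nil => intro i sp s2a a2s j _; rfl
  | cons c rest ih =>
    intro i sp s2a a2s j hj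
    by_cases hc : c ≠ '-'
    · simp only [pvBpm, if_pos hc]
      rw [ih _ _ _ _ _ (by omega)]
      exact PySem.Dict.get?_insert_of_ne _ _ (by omega)
    · simp only [pvBpm, if_neg hc]
      rw [ih _ _ _ _ _ (by omega)]
      exact PySem.Dict.get?_insert_of_ne _ _ (by omega)

-- the simulation: A's composite lookup through the two dicts equals B's direct map
theorem pvMain : ∀ (core tgt : List Char) (i cp tp : Int)
    (s2a a2sC s2aT a2s d : PySem.Dict Int Int),
    0 ≤ tp →
    (∀ p, cp < p → s2a.get? p = none) →
    (∀ j, i ≤ j → a2s.get? j = none) →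
    (∀ p j, s2a.get? p = some j → j < i) →
    (∀ p, pvF s2a a2s p = d.get? p) →
    ∀ p, pvF (pvBpm core i cp s2a a2sC).1 (pvBpm tgt i tp s2aT a2s).2 p
        = (pvDirect (core.zip tgt) cp tp d).get? p := by
  intro core
  induction core with
  | nil =>
    intro tgt i cp tp s2a a2sC s2aT a2s d _ _ h2 h4 h3 p
    show pvF s2a (pvBpm tgt i tp s2aT a2s).2 p = d.get? p
    rw [← h3 p]
    cases hs : s2a.get? p with
    | none => rw [pvF_none hs, pvF_none hs]
    | some j =>
      rw [pvF_some hs, pvF_some hs, PySem.Dict.getD_eq_get?_getD,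
        pvBpm_a2s_low _ _ _ _ _ _ (h4 p j hs), ← PySem.Dict.getD_eq_get?_getD]
  | cons c cs ih =>
    intro tgt i cp tp s2a a2sC s2aT a2s d htp h1 h2 h4 h3 p
    cases tgt with
    | nil =>
      show pvF (pvBpm (c :: cs) i cp s2a a2sC).1 a2s p = d.get? p
      by_cases hp : p ≤ cp
      · rw [pvF_eq_of_get?_eq (pvBpm_s2a_low _ _ _ _ _ _ hp), h3 p]
      · cases hs : ((pvBpm (c :: cs) i cp s2a a2sC).1).get? p with
        | none =>
          rw [pvF_none hs, ← h3 p, pvF_none (h1 p (by omega))]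
        | some j =>
          have hij := pvBpm_s2a_high _ _ _ _ _ _ _ (by omega) h1 hs
          rw [pvF_some hs, PySem.Dict.getD_eq_get?_getD, h2 j hij, ← h3 p,
            pvF_none (h1 p (by omega))]
          simp
    | cons t ts =>
      have hzip : (c :: cs).zip (t :: ts) = (c, t) :: cs.zip ts := rfl
      rw [hzip]
      by_cases hc : c ≠ '-' <;> by_cases ht : t ≠ '-'
      · -- both non-gap
        simp only [pvBpm, pvDirect, if_pos hc, if_pos ht]
        apply ih ts (i + 1) (cp + 1) (tp + 1) _ _ _ _ _ (by omega)
        · intro q hq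
          rw [PySem.Dict.get?_insert_of_ne _ _ (by omega)]; exact h1 q (by omega)
        · intro j hj
          rw [PySem.Dict.get?_insert_of_ne _ _ (by omega)]; exact h2 j (by omega)
        · intro q j hqj
          by_cases hqe : q = cp + 1
          · subst hqe; rw [PySem.Dict.get?_insert_self] at hqj
            injection hqj with hinj; omega
          · rw [PySem.Dict.get?_insert_of_ne _ _ hqe] at hqj
            have := h4 q j hqj; omega
        · intro q
          by_cases hqe : q = cp + 1
          · subst hqe
            rw [pvF_some (PySem.Dict.get?_insert_self _ _ _),
              PySem.Dict.getD_insert_self, PySem.Dict.get?_insert_self,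
              if_pos (by omega : (0:Int) < tp + 1)]
          · rw [pvF_s2a_insert_ne _ hqe, pvF_insert_high h4, h3 q,
              PySem.Dict.get?_insert_of_ne _ _ hqe]
      · -- core non-gap, target gap
        simp only [pvBpm, pvDirect, if_pos hc, if_neg ht]
        apply ih ts (i + 1) (cp + 1) tp _ _ _ _ _ htp
        · intro q hq
          rw [PySem.Dict.get?_insert_of_ne _ _ (by omega)]; exact h1 q (by omega)
        · intro j hj
          rw [PySem.Dict.get?_insert_of_ne _ _ (by omega)]; exact h2 j (by omega)
        · intro q j hqj
          by_cases hqe : q = cp + 1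
          · subst hqe; rw [PySem.Dict.get?_insert_self] at hqj
            injection hqj with hinj; omega
          · rw [PySem.Dict.get?_insert_of_ne _ _ hqe] at hqj
            have := h4 q j hqj; omega
        · intro q
          by_cases hqe : q = cp + 1
          · subst hqe
            rw [pvF_some (PySem.Dict.get?_insert_self _ _ _),
              PySem.Dict.getD_insert_self, if_neg (by omega : ¬ (0:Int) < 0),
              ← h3 (cp + 1), pvF_none (h1 (cp + 1) (by omega))]
          · rw [pvF_s2a_insert_ne _ hqe, pvF_insert_high h4, h3 q]
      · -- core gap, target non-gap
        simp only [pvBpm, pvDirect, if_neg hc, if_pos ht]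
        apply ih ts (i + 1) cp (tp + 1) _ _ _ _ _ (by omega) h1
        · intro j hj
          rw [PySem.Dict.get?_insert_of_ne _ _ (by omega)]; exact h2 j (by omega)
        · intro q j hqj; have := h4 q j hqj; omega
        · intro q
          rw [pvF_insert_high h4, h3 q]
      · -- both gaps
        simp only [pvBpm, pvDirect, if_neg hc, if_neg ht]
        apply ih ts (i + 1) cp tp _ _ _ _ _ htp h1
        · intro j hj
          rw [PySem.Dict.get?_insert_of_ne _ _ (by omega)]; exact h2 j (by omega)
        · intro q j hqj; have := h4 q j hqj; omega
        · intro q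
          rw [pvF_insert_high h4, h3 q]

-- a collecting loop over an Option-valued lookup is filterMap
theorem pvFoldOpt (F : Int → Option Int) : ∀ (l acc : List Int),
    l.foldl (fun acc p => match F p with | none => acc | some t => acc ++ [t]) acc
      = acc ++ l.filterMap F := by
  intro l
  induction l with
  | nil => intro acc; simp
  | cons p rest ih => intro acc; cases hF : F p <;> simp [hF, ih]

-- ===== VERDICT (by name: the statement is the Claim_ definition above) =====
theorem map_core_pocket_to_target_spec : Claim_equal_map_core_pocket_to_target := by
  intro core_aln tgt_aln core_pocket_1b _
  unfold Spec_map_core_pocket_to_target map_core_pocket_to_target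
    map_core_pocket_to_target_alt build_pos_maps
  have hbody : (fun (acc : List Int) (p : Int) =>
      match (pvBpm core_aln.toList 0 0 PySem.Dict.empty PySem.Dict.empty).1.get? p with
      | none => acc
      | some aln_idx =>
        if 0 < (pvBpm tgt_aln.toList 0 0 PySem.Dict.empty PySem.Dict.empty).2.getD aln_idx 0 then
          acc ++ [(pvBpm tgt_aln.toList 0 0 PySem.Dict.empty PySem.Dict.empty).2.getD aln_idx 0]
        else acc)
      = (fun acc p =>
        match pvF (pvBpm core_aln.toList 0 0 PySem.Dict.empty PySem.Dict.empty).1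
            (pvBpm tgt_aln.toList 0 0 PySem.Dict.empty PySem.Dict.empty).2 p with
        | none => acc | some t => acc ++ [t]) := by
    funext acc p
    cases hs : (pvBpm core_aln.toList 0 0 PySem.Dict.empty PySem.Dict.empty).1.get? p with
    | none => rw [pvF_none hs]
    | some j =>
      rw [pvF_some hs]
      by_cases hpos :
          0 < (pvBpm tgt_aln.toList 0 0 PySem.Dict.empty PySem.Dict.empty).2.getD j 0 <;>
        simp [hpos]
  rw [hbody, pvFoldOpt, List.nil_append]
  have hmain := pvMain core_aln.toList tgt_aln.toList 0 0 0
    PySem.Dict.empty PySem.Dict.empty PySem.Dict.empty PySem.Dict.empty PySem.Dict.empty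
    (by omega) (fun p _ => rfl) (fun j _ => rfl)
    (fun p j h => by simp [PySem.Dict.get?_empty] at h)
    (fun p => rfl)
  rw [List.filterMap_congr (fun p _ => hmain p)]
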